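-- pv_equiv track=rewrite | github.com/rishisankar/icpc | testsolving/liquidassets.py | convert
-- ===== SOURCE A (Python) =====
-- def convert(word):
--   prev = "#"
--   s = ""
--   for c in word:
--     if c != prev:
--       s += c
--     prev = c
--   if len(s) <= 2:
--     return s
--   u = s[0]
--   for i in range(1,len(s)-1):
--     if not (s[i] == 'a' or s[i] == 'e' or s[i] == 'i' or s[i] == 'o' or s[i] == 'u'):
--       u += s[i]
--   u += s[-1]
--   return u
-- ===== SOURCE B (Python) =====
-- def convert(word):
--     if not word:
--         return ''
--     out = []          # decided characters
--     cur = word[0]     # current run's character, emission deferred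
--     first = True
--     for c in word[1:]:
--         if c != cur:
--             if first or cur not in 'aeiou':
--                 out.append(cur)
--             first = False
--             cur = c
--     out.append(cur)
--     return ''.join(out)
-- ===== Notes on version B (the rewrite author's own statement) =====
-- stated objective: faster
-- what changed: B is one fused pass with deferred run emission: it never builds A's intermediate collapsed string, instead carrying the current run's character and deciding keep/drop only when the next run starts (first and final run characters are emitted unconditionally), eliminating A's second index loop, its len<=2 special case and its repeated string concatenation (characters are collected in a list and joined once).
-- intended difference: On words whose first character is '#', A's sentinel prev='#' swallows the leading run of '#' characters and A returns the conversion without that run, while B keeps the leading run like any other; keeping it is the intended duplicate-collapse behaviour. — e.g. on convert("#a"): A returns "a", B returns "#a"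
import Mathlib
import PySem

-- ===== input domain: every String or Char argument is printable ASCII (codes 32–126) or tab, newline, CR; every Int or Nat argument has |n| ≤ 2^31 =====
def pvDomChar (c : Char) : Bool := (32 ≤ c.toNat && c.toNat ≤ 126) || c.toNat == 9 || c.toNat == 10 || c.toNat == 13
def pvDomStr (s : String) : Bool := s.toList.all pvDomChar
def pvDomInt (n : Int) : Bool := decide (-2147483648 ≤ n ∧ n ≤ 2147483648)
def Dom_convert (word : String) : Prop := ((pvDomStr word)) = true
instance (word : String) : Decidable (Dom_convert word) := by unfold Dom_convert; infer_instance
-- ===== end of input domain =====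

-- B is a single fused pass with deferred run emission (no intermediate collapsed
-- string, no second index loop, no len<=2 case; one join instead of repeated
-- string concatenation); objective: faster (constant factor, measured).

-- ===== PORT A =====
-- first loop of A: build s with a running prev initialised to "#"
def convertLoop1 (word : List Char) : List Char × Char :=
  word.foldl (fun acc c => if c ≠ acc.2 then (acc.1 ++ [c], c) else (acc.1, c)) ([], '#')

-- rest of A: early return for len(s) <= 2, else u = s[0], the loop over
-- range(1, len(s)-1) appending non-vowels, then u += s[-1]
def convertTail (s : List Char) : List Char :=
  if s.length ≤ 2 then s
  else
    ((PySem.List.pyRange 1 ((s.length : Int) - 1) 1).foldl (fun u i =>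
        if ¬(PySem.List.pyGetD s i ' ' = 'a' ∨ PySem.List.pyGetD s i ' ' = 'e' ∨
             PySem.List.pyGetD s i ' ' = 'i' ∨ PySem.List.pyGetD s i ' ' = 'o' ∨
             PySem.List.pyGetD s i ' ' = 'u')
        then u ++ [PySem.List.pyGetD s i ' '] else u)
      [PySem.List.pyGetD s 0 ' ']) ++ [PySem.List.pyGetD s (-1) ' ']

def convert (word : String) : String :=
  String.ofList (convertTail (convertLoop1 word.toList).1)

-- ===== PORT B =====
-- loop body of Source B: state = (out, cur, first)
def stepB (acc : List Char × Char × Bool) (c : Char) : List Char × Char × Bool :=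
  if c != acc.2.1 then
    ((if acc.2.2 || !(['a','e','i','o','u'].contains acc.2.1) then acc.1 ++ [acc.2.1] else acc.1),
      c, false)
  else acc

def convert_alt (word : String) : String :=
  match word.toList with
  | [] => ""
  | c :: t =>
    let st := t.foldl stepB ([], c, true)
    String.ofList (st.1 ++ [st.2.1])

-- ===== PRECONDITION & SPEC =====
-- On words starting with '#', A's sentinel prev = "#" silently swallows the leading
-- run of '#' characters and A returns the conversion without it, while B keeps it
-- as it keeps every other leading character run; B's value is the intended one.
def D_convert (word : String) : Prop := word.toList.head? = some '#'
instance (word : String) : Decidable (D_convert word) := by unfold D_convert; infer_instance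
def Spec_convert (word : String) (out : String) : Prop := ¬ D_convert word → out = convert_alt word
instance (word : String) (out : String) : Decidable (Spec_convert word out) := by unfold Spec_convert; infer_instance
def pvDiffWitness_convert : String := "#a"
def pvDiffWitnessOut_convert : String × String := ("a", "#a")

-- ===== CLAIM (what is proved, stated in full; the proofs are below) =====
def Claim_unchanged_convert : Prop := ∀ (word : String), Dom_convert word → Spec_convert word (convert word)
def Claim_changed_convert : Prop := Dom_convert (pvDiffWitness_convert) ∧ D_convert (pvDiffWitness_convert) ∧ convert (pvDiffWitness_convert) = pvDiffWitnessOut_convert.1 ∧ convert_alt (pvDiffWitness_convert) = pvDiffWitnessOut_convert.2 ∧ pvDiffWitnessOut_convert.1 ≠ pvDiffWitnessOut_convert.2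
def Claim_exact_convert : Prop := ∀ (word : String), Dom_convert word → D_convert word → convert word ≠ convert_alt word

-- ===== LEMMAS AND PROOFS =====

-- reference duplicate-collapser with explicit previous character
def dedupFrom (p : Char) : List Char → List Char
  | [] => []
  | c :: t => if c ≠ p then c :: dedupFrom c t else dedupFrom c t

theorem loop1_eq (w : List Char) : ∀ (acc : List Char) (p : Char),
    (w.foldl (fun acc c => if c ≠ acc.2 then (acc.1 ++ [c], c) else (acc.1, c)) (acc, p)).1
      = acc ++ dedupFrom p w := by
  induction w with
  | nil => intro acc p; simp [dedupFrom]
  | cons c t ih =>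
    intro acc p
    by_cases h : c = p
    · simpa [List.foldl_cons, dedupFrom, h] using ih acc p
    · simpa [List.foldl_cons, dedupFrom, h] using ih (acc ++ [c]) c

theorem dedup_head_ne (w : List Char) : ∀ (p x : Char) (l : List Char),
    dedupFrom p w = x :: l → x ≠ p := by
  induction w with
  | nil => intro p x l h; simp [dedupFrom] at h
  | cons c t ih =>
    intro p x l h
    by_cases hc : c = p
    · rw [dedupFrom, if_neg (by simp [hc])] at h
      exact hc ▸ ih c x l h
    · rw [dedupFrom, if_pos hc] at h
      rw [← ((List.cons.injEq ..).mp h).1]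
      exact hc

-- proof-side name for the shared non-vowel test
def nonv (c : Char) : Bool := !(['a','e','i','o','u'].contains c)

-- keep the last character of a nonempty list unconditionally, filter the rest by nonv
def tailfilt : List Char → List Char
  | [] => []
  | c :: t => if t = [] then [c] else (if nonv c then [c] else []) ++ tailfilt t

-- one character: A's chained-equality vowel test agrees with nonv
theorem vowel_bridge (c : Char) :
    decide (¬(c = 'a' ∨ c = 'e' ∨ c = 'i' ∨ c = 'o' ∨ c = 'u')) = nonv c := by
  simp [nonv]

theorem tailfilt_append (z : Char) : ∀ (mid : List Char),
    tailfilt (mid ++ [z]) = mid.filter nonv ++ [z] := by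
  intro mid
  induction mid with
  | nil => simp [tailfilt]
  | cons c rest ih =>
    rw [List.cons_append, tailfilt, if_neg (by simp), ih, List.filter_cons]
    cases h : nonv c <;> simp [h]

-- A's second stage on a nonempty collapsed string keeps the head, filters the
-- middle by nonv and keeps the last character
theorem convertTail_eq (x : Char) (l : List Char) :
    convertTail (x :: l) = x :: tailfilt l := by
  match l with
  | [] => simp [convertTail, tailfilt]
  | [z] => simp [convertTail, tailfilt]
  | b :: c0 :: t =>
    have hr : (b :: c0 :: t) ≠ [] := by simp
    obtain ⟨mid, z, hmz, hmlen⟩ : ∃ mid z, b :: c0 :: t = mid ++ [z] ∧ 1 ≤ mid.length :=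
      ⟨(b :: c0 :: t).dropLast, (b :: c0 :: t).getLast hr,
        ((b :: c0 :: t).dropLast_append_getLast hr).symm, by
          cases hd : (b :: c0 :: t).dropLast with
          | nil => simp at hd
          | cons _ _ => simp⟩
    rw [hmz, tailfilt_append]
    have hslen : (x :: (mid ++ [z])).length = mid.length + 2 := by simp
    have hlen2 : ((x :: (mid ++ [z])).length : Int) = (mid.length : Int) + 2 := by simp; omega
    have hlen1 : ((x :: mid).length : Int) = (mid.length : Int) + 1 := by simp
    have hbound : ((x :: (mid ++ [z])).length : Int) - 1 = ((x :: mid).length : Int) := by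
      simp
    have hneg : PySem.List.pyGetD (x :: (mid ++ [z])) (-1) ' ' = z := by
      rw [show x :: (mid ++ [z]) = (x :: mid) ++ [z] from by simp]
      exact PySem.List.pyGetD_neg_one_append_singleton ..
    have hcg : ∀ (u : List Char), ∀ i ∈ PySem.List.pyRange 1 ((x :: mid).length : Int) 1,
        (if ¬(PySem.List.pyGetD (x :: (mid ++ [z])) i ' ' = 'a' ∨
              PySem.List.pyGetD (x :: (mid ++ [z])) i ' ' = 'e' ∨
              PySem.List.pyGetD (x :: (mid ++ [z])) i ' ' = 'i' ∨
              PySem.List.pyGetD (x :: (mid ++ [z])) i ' ' = 'o' ∨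
              PySem.List.pyGetD (x :: (mid ++ [z])) i ' ' = 'u')
          then u ++ [PySem.List.pyGetD (x :: (mid ++ [z])) i ' '] else u)
        = (if ¬(PySem.List.pyGetD (x :: mid) i ' ' = 'a' ∨
              PySem.List.pyGetD (x :: mid) i ' ' = 'e' ∨
              PySem.List.pyGetD (x :: mid) i ' ' = 'i' ∨
              PySem.List.pyGetD (x :: mid) i ' ' = 'o' ∨
              PySem.List.pyGetD (x :: mid) i ' ' = 'u')
          then u ++ [PySem.List.pyGetD (x :: mid) i ' '] else u) := by
      intro u i hi
      have hi' := (PySem.List.mem_pyRange_one).mp hi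
      have hget : PySem.List.pyGetD (x :: (mid ++ [z])) i ' ' = PySem.List.pyGetD (x :: mid) i ' ' := by
        rw [PySem.List.pyGetD_eq_getElem (x :: (mid ++ [z])) ' ' (by omega) (by rw [hlen2]; omega),
          PySem.List.pyGetD_eq_getElem (x :: mid) ' ' (by omega) hi'.2]
        exact List.getElem_append_left (as := x :: mid) (bs := [z]) (by omega)
      rw [hget]
    rw [convertTail, if_neg (by rw [hslen]; omega), hbound,
      PySem.List.foldl_congr_mem _ _ _ _ hcg,
      PySem.List.foldl_pyRange_pyGetD' (x :: mid) ' '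
        (fun (u : List Char) (ci : Char) =>
          if ¬(ci = 'a' ∨ ci = 'e' ∨ ci = 'i' ∨ ci = 'o' ∨ ci = 'u') then u ++ [ci] else u)
        _ (by norm_num),
      PySem.List.foldl_append_ite_eq_filter, hneg, PySem.List.pyGetD_zero_cons]
    have hfc := List.filter_congr
      (fun c (_ : c ∈ (List.drop ((1 : Int)).toNat (x :: mid))) => vowel_bridge c)
    rw [hfc]
    simp

-- tailfilt on a list of length ≥ 2 keeps the head iff it is a non-vowel
theorem tailfilt_cons_cons (a b : Char) (l : List Char) :
    tailfilt (a :: b :: l) = (if nonv a then [a] else []) ++ tailfilt (b :: l) := by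
  rw [tailfilt, if_neg (by simp)]

-- B's loop after the first run boundary has been crossed (first = false)
theorem loopB_false (t : List Char) : ∀ (out : List Char) (cur : Char),
    (t.foldl stepB (out, cur, false)).1 ++ [(t.foldl stepB (out, cur, false)).2.1]
      = out ++ tailfilt (cur :: dedupFrom cur t) := by
  induction t with
  | nil => intro out cur; simp [tailfilt, dedupFrom]
  | cons c t' ih =>
    intro out cur
    by_cases h : c = cur
    · subst h
      rw [List.foldl_cons, show stepB (out, c, false) c = (out, c, false) from by
        simp [stepB], ih, dedupFrom, if_neg (by simp)]
    · have hstep : stepB (out, cur, false) c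
          = ((if nonv cur then out ++ [cur] else out), c, false) := by
        simp [stepB, h, nonv]
      have hd : dedupFrom cur (c :: t') = c :: dedupFrom c t' := by
        rw [dedupFrom, if_pos h]
      rw [List.foldl_cons, hstep, ih, hd, tailfilt_cons_cons]
      cases hv : nonv cur <;> simp [hv]

-- B's loop from the start (first = true): the first run's character is always kept
theorem loopB_true (t : List Char) : ∀ (out : List Char) (cur : Char),
    (t.foldl stepB (out, cur, true)).1 ++ [(t.foldl stepB (out, cur, true)).2.1]
      = out ++ cur :: tailfilt (dedupFrom cur t) := by
  induction t with
  | nil => intro out cur; simp [dedupFrom, tailfilt]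
  | cons c t' ih =>
    intro out cur
    by_cases h : c = cur
    · subst h
      rw [List.foldl_cons, show stepB (out, c, true) c = (out, c, true) from by
        simp [stepB], ih, dedupFrom, if_neg (by simp)]
    · have hstep : stepB (out, cur, true) c = (out ++ [cur], c, false) := by
        simp [stepB, h]
      have hd : dedupFrom cur (c :: t') = c :: dedupFrom c t' := by
        rw [dedupFrom, if_pos h]
      rw [List.foldl_cons, hstep, loopB_false, hd]
      simp

theorem convert_alt_eq (word : String) (c : Char) (t : List Char)
    (hw : word.toList = c :: t) :
    convert_alt word = String.ofList (c :: tailfilt (dedupFrom c t)) := by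
  unfold convert_alt
  rw [hw]
  exact congrArg String.ofList (by simpa using loopB_true t [] c)

-- ===== VERDICT (by name: the statement is the Claim_ definition above) =====
theorem convert_spec : Claim_unchanged_convert := by
  intro word _
  unfold Spec_convert
  intro hnD
  unfold D_convert at hnD
  cases hw : word.toList with
  | nil => rw [convert, convert_alt, hw]; rfl
  | cons c t =>
    have hc : c ≠ '#' := by
      rw [hw] at hnD
      simpa using hnD
    have hA1 : (convertLoop1 (c :: t)).1 = c :: dedupFrom c t := by
      rw [convertLoop1, loop1_eq]
      simp [dedupFrom, hc]
    rw [convert, hw, hA1, convertTail_eq, convert_alt_eq word c t hw]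

theorem convert_changed : Claim_changed_convert := by
  unfold Claim_changed_convert; decide

theorem convert_tight : Claim_exact_convert := by
  intro word _ hD hEq
  unfold D_convert at hD
  cases hw : word.toList with
  | nil => rw [hw] at hD; simp at hD
  | cons c t =>
    rw [hw] at hD
    have hc : c = '#' := by simpa using hD
    subst hc
    have hBlist : (convert_alt word).toList = '#' :: tailfilt (dedupFrom '#' t) := by
      rw [convert_alt_eq word '#' t hw, String.toList_ofList]
    have hA1 : (convertLoop1 ('#' :: t)).1 = dedupFrom '#' t := by
      rw [convertLoop1, loop1_eq]; simp [dedupFrom]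
    have hAlist : (convert word).toList = convertTail (dedupFrom '#' t) := by
      rw [convert, hw, hA1, String.toList_ofList]
    rw [hEq, hBlist] at hAlist
    cases hdd : dedupFrom '#' t with
    | nil =>
      rw [hdd] at hAlist
      simp [convertTail] at hAlist
    | cons x l =>
      rw [hdd, convertTail_eq] at hAlist
      have hx : x ≠ '#' := dedup_head_ne t '#' x l hdd
      exact hx (((List.cons.injEq ..).mp hAlist.symm).1)
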